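-- pv_equiv track=rewrite | github.com/AnnieChmarak/aoc | 2024/15.py | parse
-- ===== SOURCE A (Python) =====
-- Point = tuple[int, int]
--
-- Matrix = list[list[str]]
--
-- def parse(input: str, verbose: bool) -> tuple[Matrix, Point, list[str]]:
--     matrix_lines, commands_lines = input.split('\n\n')
--     matrix = [list(line) for line in matrix_lines.split('\n')]
--     robot = None
--     for y, row in enumerate(matrix):
--         for x, cell in enumerate(row):
--             if cell == '@':
--                 robot = (x, y)
--                 break
--     commands = list(commands_lines.replace('\n', ''))
--     return matrix, robot, commands
-- ===== SOURCE B (Python) =====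
-- def parse(input: str, verbose: bool):
--     matrix_lines, commands_lines = input.split('\n\n')
--     matrix = [list(line) for line in matrix_lines.split('\n')]
--     idx = matrix_lines.find('@')
--     if idx == -1:
--         robot = None
--     else:
--         head = matrix_lines[:idx]
--         robot = (idx - head.rfind('\n') - 1, head.count('\n'))
--     commands = list(commands_lines.replace('\n', ''))
--     return matrix, robot, commands
-- ===== Notes on version B (the rewrite author's own statement) =====
-- stated objective: alternative
-- what changed: B locates the robot by string-offset arithmetic on the raw matrix block (find('@'), then rfind('\n') and count('\n') on the prefix) instead of A's nested row/column scan over the parsed grid; Pre_ excludes inputs where A raises on unpacking split('\n\n') or returns robot=None (no '@'), which is not a Point.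
-- intended difference: When '@' occurs in two or more matrix rows, A's outer loop lacks a break so it returns the first '@' of the LAST such row, while B returns the overall first '@' (row-major), which is the intended first-occurrence semantics. — e.g. on parse("@.\n.@\n\n<", false): A returns ([["@", "."], [".", "@"]], (1, 1), ["<"]), B returns ([["@", "."], [".", "@"]], (0, 0), ["<"])
-- outside the precondition, e.g. on parse('#.\n\n<', False): A returns ([['#', '.']], None, ['<']), B returns ([['#', '.']], None, ['<']); on parse('ab', False): A raises ValueError, B raises ValueError
import Mathlib
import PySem

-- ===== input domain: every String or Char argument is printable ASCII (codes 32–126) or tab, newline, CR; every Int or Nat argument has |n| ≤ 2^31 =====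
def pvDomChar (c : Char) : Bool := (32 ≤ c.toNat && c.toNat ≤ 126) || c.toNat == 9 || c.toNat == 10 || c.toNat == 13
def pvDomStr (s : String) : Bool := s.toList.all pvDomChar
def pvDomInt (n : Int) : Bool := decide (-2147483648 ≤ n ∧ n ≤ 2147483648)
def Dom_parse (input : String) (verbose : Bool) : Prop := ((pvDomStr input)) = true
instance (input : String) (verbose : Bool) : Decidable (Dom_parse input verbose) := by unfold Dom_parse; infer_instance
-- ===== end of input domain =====

-- B locates the robot by string-offset arithmetic (find '@', then rfind '\n' / count '\n' on the
-- prefix) instead of A's nested row/column scan over the parsed grid; on grids where '@' occurs in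
-- several rows A's missing outer break picks the last such row, B the row-major first occurrence.

-- ===== PORT A =====
-- inner loop `for x, cell in enumerate(row): if cell == '@': robot = (x, y); break`
def parseRowScan (row : List String) (x : Int) (y : Int) (robot : Option (Int × Int)) :
    Option (Int × Int) :=
  match row with
  | [] => robot
  | cell :: rest => if cell == "@" then some (x, y) else parseRowScan rest (x + 1) y robot

-- outer loop `for y, row in enumerate(matrix)` (no break: a later row's '@' overwrites)
def parseGridScan (m : List (List String)) (y : Int) (robot : Option (Int × Int)) :
    Option (Int × Int) :=
  match m with
  | [] => robot
  | row :: rs => parseGridScan rs (y + 1) (parseRowScan row 0 y robot)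

-- `robot = None` (no '@' in the grid) is not a value of the declared Point type; Pre_parse
-- excludes those inputs, and both ports render that excluded `None` as the pair (-1, -1).
def parse (input : String) (verbose : Bool) :
    List (List String) × (Int × Int) × List String :=
  let parts := (PySem.Str.split? input "\n\n").getD []          -- input.split('\n\n')
  let matrix_lines := parts.getD 0 ""
  let commands_lines := parts.getD 1 ""
  let matrix := ((PySem.Str.split? matrix_lines "\n").getD []).map
      (fun line => line.toList.map (fun c => String.ofList [c]))
  let robot := parseGridScan matrix 0 none
  let commands := (PySem.Str.replace commands_lines "\n" "").toList.map
      (fun c => String.ofList [c])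
  (matrix, robot.getD (-1, -1), commands)

-- ===== PORT B =====
def parse_alt (input : String) (verbose : Bool) :
    List (List String) × (Int × Int) × List String :=
  let parts := (PySem.Str.split? input "\n\n").getD []          -- input.split('\n\n')
  let matrix_lines := parts.getD 0 ""
  let commands_lines := parts.getD 1 ""
  let matrix := ((PySem.Str.split? matrix_lines "\n").getD []).map
      (fun line => line.toList.map (fun c => String.ofList [c]))
  let idx := PySem.Str.find matrix_lines "@"                    -- matrix_lines.find('@')
  let robot : Option (Int × Int) :=
    if idx == -1 then none
    else
      let head := PySem.Str.slice matrix_lines none (some idx)  -- matrix_lines[:idx]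
      some (idx - PySem.Str.rfind head "\n" - 1,                -- head.rfind('\n')
            (PySem.Str.count head "\n" : Int))                  -- head.count('\n')
  let commands := (PySem.Str.replace commands_lines "\n" "").toList.map
      (fun c => String.ofList [c])
  (matrix, robot.getD (-1, -1), commands)

-- ===== PRECONDITION & SPEC =====
-- Pre_parse excludes (i) inputs without exactly one '\n\n' split point, on which A raises
-- ValueError from unpacking `input.split('\n\n')`, and (ii) inputs whose matrix block has no
-- '@', on which A returns robot = None, which is not a value of the declared Point type.
def Pre_parse (input : String) (verbose : Bool) : Prop :=
  ((PySem.Str.split? input "\n\n").getD []).length = 2 ∧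
  PySem.Str.isIn "@" (((PySem.Str.split? input "\n\n").getD []).getD 0 "") = true
instance (input : String) (verbose : Bool) : Decidable (Pre_parse input verbose) := by
  unfold Pre_parse; infer_instance

def pvWitness_parse : String × Bool := ("#.@\n.#.\n\n<>^v\nv^", false)

-- When '@' occurs in two or more matrix rows, A's outer loop lacks a break so it returns the
-- first '@' of the LAST such row, while B returns the overall first '@' (row-major), which is
-- the intended first-occurrence semantics.
def D_parse (input : String) (verbose : Bool) : Prop :=
  2 ≤ ((PySem.Chars.splitOn
        (((PySem.Chars.split? input.toList ['\n', '\n']).getD []).getD 0 []) ['\n']).countP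
        (fun row => decide ('@' ∈ row)))
instance (input : String) (verbose : Bool) : Decidable (D_parse input verbose) := by
  unfold D_parse; infer_instance

def Spec_parse (input : String) (verbose : Bool)
    (out : List (List String) × (Int × Int) × List String) : Prop :=
  ¬ D_parse input verbose → out = parse_alt input verbose
instance (input : String) (verbose : Bool)
    (out : List (List String) × (Int × Int) × List String) :
    Decidable (Spec_parse input verbose out) := by
  unfold Spec_parse; infer_instance

def pvDiffWitness_parse : String × Bool := ("@.\n.@\n\n<", false)
def pvDiffWitnessOut_parse :
    (List (List String) × (Int × Int) × List String) ×
    (List (List String) × (Int × Int) × List String) :=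
  (([["@", "."], [".", "@"]], (1, 1), ["<"]),
   ([["@", "."], [".", "@"]], (0, 0), ["<"]))

-- ===== CLAIM (what is proved, stated in full; the proofs are below) =====
def Claim_unchanged_parse : Prop := ∀ (input : String) (verbose : Bool),
  Dom_parse input verbose → Pre_parse input verbose →
  Spec_parse input verbose (parse input verbose)
def Claim_changed_parse : Prop :=
  Dom_parse (pvDiffWitness_parse.1) (pvDiffWitness_parse.2) ∧
  Pre_parse (pvDiffWitness_parse.1) (pvDiffWitness_parse.2) ∧
  D_parse (pvDiffWitness_parse.1) (pvDiffWitness_parse.2) ∧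
  parse (pvDiffWitness_parse.1) (pvDiffWitness_parse.2) = pvDiffWitnessOut_parse.1 ∧
  parse_alt (pvDiffWitness_parse.1) (pvDiffWitness_parse.2) = pvDiffWitnessOut_parse.2 ∧
  pvDiffWitnessOut_parse.1 ≠ pvDiffWitnessOut_parse.2
def Claim_exact_parse : Prop := ∀ (input : String) (verbose : Bool),
  Dom_parse input verbose → Pre_parse input verbose → D_parse input verbose →
  parse input verbose ≠ parse_alt input verbose

-- ===== LEMMAS AND PROOFS =====

def rlast (l : List Char) (c : Char) : Int :=
  match l with
  | [] => -1
  | d :: t => if rlast t c = -1 then (if d = c then 0 else -1) else 1 + rlast t c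
def ffirst (l : List Char) (c : Char) : Int :=
  match l with
  | [] => -1
  | d :: t => if d = c then 0 else (if ffirst t c = -1 then -1 else 1 + ffirst t c)

theorem neg_one_le_rlast (l : List Char) (c : Char) : -1 ≤ rlast l c := by
  induction l with
  | nil => simp [rlast]
  | cons d t ih => simp only [rlast]; split_ifs <;> omega

theorem neg_one_le_ffirst (l : List Char) (c : Char) : -1 ≤ ffirst l c := by
  induction l with
  | nil => simp [ffirst]
  | cons d t ih => simp only [ffirst]; split_ifs <;> omega

theorem rlast_eq_neg_one_iff (l : List Char) (c : Char) : rlast l c = -1 ↔ c ∉ l := by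
  induction l with
  | nil => simp [rlast]
  | cons d t ih =>
    simp only [rlast, List.mem_cons]
    have h1 := neg_one_le_rlast t c
    constructor
    · intro he
      by_cases h2 : rlast t c = -1
      · rw [if_pos h2] at he
        by_cases h3 : d = c
        · rw [if_pos h3] at he; exact absurd he (by decide)
        · intro hx
          rcases hx with hx | hx
          · exact h3 hx.symm
          · exact (ih.mp h2) hx
      · rw [if_neg h2] at he; omega
    · intro hx
      push_neg at hx
      have h2 : rlast t c = -1 := ih.mpr hx.2
      rw [if_pos h2, if_neg (fun h => hx.1 h.symm)]

theorem ffirst_eq_neg_one_iff (l : List Char) (c : Char) : ffirst l c = -1 ↔ c ∉ l := by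
  induction l with
  | nil => simp [ffirst]
  | cons d t ih =>
    simp only [ffirst, List.mem_cons]
    constructor
    · intro he
      by_cases h2 : d = c
      · rw [if_pos h2] at he; exact absurd he (by decide)
      · rw [if_neg h2] at he
        by_cases h3 : ffirst t c = -1
        · intro hx
          rcases hx with hx | hx
          · exact h2 hx.symm
          · exact (ih.mp h3) hx
        · rw [if_neg h3] at he; have h1 := neg_one_le_ffirst t c; omega
    · intro hx
      push_neg at hx
      have h3 : ffirst t c = -1 := ih.mpr hx.2
      rw [if_neg (fun h => hx.1 h.symm), if_pos h3]

theorem ffirst_lt_length (l : List Char) (c : Char) : ffirst l c < l.length := by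
  induction l with
  | nil => simp [ffirst]
  | cons d t ih => simp only [ffirst, List.length_cons]; split_ifs <;> push_cast <;> omega

theorem ffirst_nonneg (l : List Char) (c : Char) (h : c ∈ l) : 0 ≤ ffirst l c := by
  have h1 := neg_one_le_ffirst l c
  have h2 : ffirst l c ≠ -1 := (not_iff_not.mpr (ffirst_eq_neg_one_iff l c)).mpr (by simpa)
  omega

theorem rlast_append (a b : List Char) (c : Char) :
    rlast (a ++ b) c = if rlast b c = -1 then rlast a c else a.length + rlast b c := by
  induction a with
  | nil => simp [rlast]
  | cons d t ih =>
    simp only [List.cons_append, rlast, ih, List.length_cons]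
    have h1 := neg_one_le_rlast b c
    have h2 := neg_one_le_rlast t c
    split_ifs <;> push_cast <;> omega

theorem rlast_sep_cons (a b : List Char) (c : Char) :
    rlast (a ++ c :: b) c = a.length + 1 + rlast b c := by
  have h := rlast_append a (c :: b) c
  simp only [rlast] at h
  have h1 := neg_one_le_rlast b c
  split_ifs at h <;> simp_all <;> omega

theorem ffirst_append_left (a b : List Char) (c : Char) (h : c ∈ a) :
    ffirst (a ++ b) c = ffirst a c := by
  induction a with
  | nil => simp at h
  | cons d t ih =>
    simp only [List.cons_append, ffirst]
    by_cases hd : d = c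
    · simp [hd]
    · have hm : c ∈ t := by
        rcases List.mem_cons.mp h with h' | h'
        · exact absurd h'.symm hd
        · exact h'
      have h1 : ffirst t c ≠ -1 := (not_iff_not.mpr (ffirst_eq_neg_one_iff t c)).mpr (by simpa)
      have h2 : ffirst (t ++ b) c ≠ -1 := by rw [ih hm]; exact h1
      simp [hd, ih hm, h1, h2]

theorem ffirst_append_right (a b : List Char) (c : Char) (ha : c ∉ a) (hb : c ∈ b) :
    ffirst (a ++ b) c = a.length + ffirst b c := by
  induction a with
  | nil => simp [ffirst]
  | cons d t ih =>
    have hd : ¬ d = c := fun hh => ha (by simp [hh])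
    have ht : c ∉ t := fun hm => ha (List.mem_cons_of_mem d hm)
    have h1 : 0 ≤ ffirst b c := ffirst_nonneg b c hb
    have h2 : ffirst (t ++ b) c = t.length + ffirst b c := ih ht
    simp only [List.cons_append, ffirst, if_neg hd, h2, List.length_cons]
    rw [if_neg (by push_cast; omega)]
    push_cast; ring

theorem find_go_single (c : Char) (l : List Char) (k : Nat) :
    PySem.Chars.find.go [c] l k =
      if ffirst l c = -1 then -1 else k + ffirst l c := by
  induction l generalizing k with
  | nil => simp [PySem.Chars.find.go.eq_1, ffirst]
  | cons d t ih =>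
    rw [PySem.Chars.find.go.eq_2]
    by_cases hd : d = c
    · have hp : List.isPrefixOf [c] (d :: t) = true := by simp [List.isPrefixOf, hd]
      simp [hp, ffirst, hd]
    · have hp : List.isPrefixOf [c] (d :: t) = false := by
        simp only [List.isPrefixOf, Bool.and_eq_false_iff, beq_eq_false_iff_ne, ne_eq]
        left; exact fun hh => hd hh.symm
      rw [hp]
      simp only [Bool.false_eq_true, if_false, ih]
      have h1 := neg_one_le_ffirst t c
      simp only [ffirst, if_neg hd]
      by_cases h3 : ffirst t c = -1
      · simp [h3]
      · rw [if_neg h3, if_neg h3, if_neg (by omega : ¬(1 + ffirst t c = -1))]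
        push_cast; ring

theorem find_single (s : List Char) (c : Char) : PySem.Chars.find s [c] = ffirst s c := by
  have h := find_go_single c s 0
  have h1 := neg_one_le_ffirst s c
  unfold PySem.Chars.find
  rw [h]; split_ifs with h2 <;> omega

theorem rlast_snoc (l : List Char) (d c : Char) :
    rlast (l ++ [d]) c = if d = c then (l.length : Int) else rlast l c := by
  rw [rlast_append]
  by_cases hd : d = c <;> simp [rlast, hd]

theorem rfind_go_succ (s sub : List Char) (j : Nat) :
    PySem.Chars.rfind.go s sub (j + 1) =
      if sub.isPrefixOf (s.drop (j + 1)) = true then ((j + 1 : Nat) : Int)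
      else PySem.Chars.rfind.go s sub j := by
  rfl

theorem rfind_go_single (s : List Char) (c : Char) (x : Nat) :
    PySem.Chars.rfind.go s [c] x = rlast (s.take (x + 1)) c := by
  induction x with
  | zero =>
    rw [PySem.Chars.rfind.go.eq_def]
    cases s with
    | nil => simp [rlast]
    | cons a t =>
      by_cases h : a = c
      · simp [List.isPrefixOf, rlast, h]
      · have hp : List.isPrefixOf [c] (a :: t) = false := by
          simp only [List.isPrefixOf, Bool.and_eq_false_iff, beq_eq_false_iff_ne, ne_eq]
          left; exact fun hh => h hh.symm
        simp [hp, rlast, h]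
  | succ j ih =>
    rw [rfind_go_succ]
    by_cases hlt : j + 1 < s.length
    · have htake : s.take (j + 1 + 1) = s.take (j + 1) ++ [s[j+1]] := by
        rw [List.take_succ]; simp [List.getElem?_eq_getElem hlt]
      rw [htake, rlast_snoc]
      have hdrop : s.drop (j + 1) = s[j+1] :: s.drop (j + 2) := by
        rw [List.drop_eq_getElem_cons hlt]
      rw [hdrop]
      by_cases h : s[j+1] = c
      · have hp : List.isPrefixOf [c] (s[j+1] :: s.drop (j+2)) = true := by
          simp [List.isPrefixOf, h]
        rw [hp, if_pos rfl, if_pos h]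
        simp [List.length_take, Nat.min_eq_left (le_of_lt hlt)]
      · have hp : List.isPrefixOf [c] (s[j+1] :: s.drop (j+2)) = false := by
          simp only [List.isPrefixOf, Bool.and_eq_false_iff, beq_eq_false_iff_ne, ne_eq]
          left; exact fun hh => h hh.symm
        rw [hp, if_neg h]
        simp only [Bool.false_eq_true, if_false, ih]
    · have hdrop : s.drop (j + 1) = [] := List.drop_eq_nil_of_le (by omega)
      have htake : s.take (j + 1 + 1) = s.take (j + 1) := by
        rw [List.take_of_length_le (by omega), List.take_of_length_le (by omega)]
      simp [hdrop, htake, ih, List.isPrefixOf]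

theorem rfind_single (s : List Char) (c : Char) : PySem.Chars.rfind s [c] = rlast s c := by
  unfold PySem.Chars.rfind
  cases hs : s.length with
  | zero =>
    have : s = [] := List.eq_nil_of_length_eq_zero hs
    subst this
    simp [PySem.Chars.rfind.go.eq_def, List.isPrefixOf, rlast]
  | succ n =>
    rw [rfind_go_single]
    congr 1
    exact List.take_of_length_le (by omega)

theorem count_go_single (c : Char) (l : List Char) (fuel acc : Nat) (h : l.length ≤ fuel) :
    PySem.Chars.count.go [c] fuel l acc = acc + l.count c := by
  induction l generalizing fuel acc with
  | nil => rw [PySem.Chars.count.go.eq_def]; cases fuel <;> simp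
  | cons d t ih =>
    simp only [List.length_cons] at h
    obtain ⟨f, rfl⟩ : ∃ f, fuel = f + 1 := ⟨fuel - 1, by omega⟩
    rw [PySem.Chars.count.go.eq_def]
    by_cases hd : d = c
    · have hp : List.isPrefixOf [c] (d :: t) = true := by simp [List.isPrefixOf, hd]
      simp only [hp, if_pos rfl]
      have : List.drop [c].length (d :: t) = t := by simp
      rw [this, ih f (acc + 1) (by omega)]
      simp [List.count_cons, hd]
      omega
    · have hp : List.isPrefixOf [c] (d :: t) = false := by
        simp only [List.isPrefixOf, Bool.and_eq_false_iff, beq_eq_false_iff_ne, ne_eq]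
        left; exact fun hh => hd hh.symm
      simp only [hp, Bool.false_eq_true, if_false]
      rw [ih f acc (by omega)]
      simp [List.count_cons]
      intro hc; exact absurd hc hd

theorem count_single (s : List Char) (c : Char) : PySem.Chars.count s [c] = s.count c := by
  unfold PySem.Chars.count
  simp [count_go_single c s s.length 0 le_rfl]

theorem splitOn_go_nil (c : Char) (f : Nat) (cur : List Char) (acc : List (List Char)) :
    PySem.Chars.splitOn.go [c] (f + 1) [] cur acc = (cur.reverse :: acc).reverse := by rfl

theorem splitOn_go_cons (c : Char) (f : Nat) (d : Char) (rest cur : List Char)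
    (acc : List (List Char)) :
    PySem.Chars.splitOn.go [c] (f + 1) (d :: rest) cur acc =
      if List.isPrefixOf [c] (d :: rest) = true then
        PySem.Chars.splitOn.go [c] f (List.drop 1 (d :: rest)) [] (cur.reverse :: acc)
      else PySem.Chars.splitOn.go [c] f rest (d :: cur) acc := by rfl

theorem splitOn_go_norm (c : Char) (l : List Char) (fuel : Nat) (cur : List Char)
    (acc : List (List Char)) (h : l.length < fuel) :
    PySem.Chars.splitOn.go [c] fuel l cur acc =
      acc.reverse ++ PySem.Chars.splitOn.go [c] (l.length + 1) l cur [] := by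
  induction l generalizing fuel cur acc with
  | nil =>
    obtain ⟨f, rfl⟩ : ∃ f, fuel = f + 1 := ⟨fuel - 1, by omega⟩
    simp [splitOn_go_nil]
  | cons d t ih =>
    obtain ⟨f, rfl⟩ : ∃ f, fuel = f + 1 := ⟨fuel - 1, by omega⟩
    simp only [List.length_cons] at h
    rw [splitOn_go_cons, splitOn_go_cons]
    by_cases hp : List.isPrefixOf [c] (d :: t) = true
    · rw [if_pos hp, if_pos hp]
      simp only [List.drop_one, List.tail_cons, List.length_cons, List.reverse_nil]
      rw [ih f [] (cur.reverse :: acc) (by omega)]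
      try rw [ih (t.length + 1) [] [cur.reverse] (by omega)]
      simp
    · rw [if_neg hp, if_neg hp]
      simp only [List.length_cons]
      rw [ih f (d :: cur) acc (by omega), ih (t.length + 1) (d :: cur) [] (by omega)]

theorem splitOn_not_mem_aux (c : Char) (l : List Char) (fuel : Nat) (cur : List Char)
    (acc : List (List Char)) (hf : l.length < fuel) (h : c ∉ l) :
    PySem.Chars.splitOn.go [c] fuel l cur acc = acc.reverse ++ [cur.reverse ++ l] := by
  induction l generalizing fuel cur acc with
  | nil =>
    obtain ⟨f, rfl⟩ : ∃ f, fuel = f + 1 := ⟨fuel - 1, by omega⟩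
    simp [splitOn_go_nil]
  | cons d t ih =>
    obtain ⟨f, rfl⟩ : ∃ f, fuel = f + 1 := ⟨fuel - 1, by omega⟩
    simp only [List.length_cons] at hf
    rw [splitOn_go_cons]
    have hd : ¬ d = c := fun hh => h (by simp [hh])
    have hp : List.isPrefixOf [c] (d :: t) = false := by
      simp only [List.isPrefixOf, Bool.and_eq_false_iff, beq_eq_false_iff_ne, ne_eq]
      left; exact fun hh => hd hh.symm
    rw [hp]
    simp only [Bool.false_eq_true, if_false]
    rw [ih f (d :: cur) acc (by omega) (fun hm => h (List.mem_cons_of_mem d hm))]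
    simp

theorem splitOn_not_mem (s : List Char) (c : Char) (h : c ∉ s) :
    PySem.Chars.splitOn s [c] = [s] := by
  unfold PySem.Chars.splitOn
  rw [splitOn_not_mem_aux c s (s.length + 1) [] [] (by omega) h]
  simp

theorem splitOn_cons_aux (c : Char) (r rest : List Char) (fuel : Nat) (cur : List Char)
    (acc : List (List Char)) (hf : (r ++ c :: rest).length < fuel) (h : c ∉ r) :
    PySem.Chars.splitOn.go [c] fuel (r ++ c :: rest) cur acc =
      acc.reverse ++ (cur.reverse ++ r) :: PySem.Chars.splitOn rest [c] := by
  induction r generalizing fuel cur acc with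
  | nil =>
    obtain ⟨f, rfl⟩ : ∃ f, fuel = f + 1 := ⟨fuel - 1, by omega⟩
    simp only [List.nil_append]
    rw [splitOn_go_cons]
    have hp : List.isPrefixOf [c] (c :: rest) = true := by simp [List.isPrefixOf]
    rw [if_pos hp]
    simp only [List.drop_one, List.tail_cons]
    simp only [List.length_append, List.length_cons, List.length_nil] at hf
    rw [splitOn_go_norm c rest f [] (cur.reverse :: acc) (by omega)]
    unfold PySem.Chars.splitOn
    simp
  | cons d r' ih =>
    obtain ⟨f, rfl⟩ : ∃ f, fuel = f + 1 := ⟨fuel - 1, by omega⟩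
    simp only [List.length_append, List.length_cons] at hf
    rw [List.cons_append, splitOn_go_cons]
    have hd : ¬ d = c := fun hh => h (by simp [hh])
    have hp : List.isPrefixOf [c] (d :: (r' ++ c :: rest)) = false := by
      simp only [List.isPrefixOf, Bool.and_eq_false_iff, beq_eq_false_iff_ne, ne_eq]
      left; exact fun hh => hd hh.symm
    rw [hp]
    simp only [Bool.false_eq_true, if_false]
    rw [ih f (d :: cur) acc (by simp; omega) (fun hm => h (List.mem_cons_of_mem d hm))]
    simp

theorem splitOn_cons (r rest : List Char) (c : Char) (h : c ∉ r) :
    PySem.Chars.splitOn (r ++ c :: rest) [c] = r :: PySem.Chars.splitOn rest [c] := by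
  unfold PySem.Chars.splitOn
  rw [splitOn_cons_aux c r rest ((r ++ c :: rest).length + 1) [] [] (by omega) h]
  unfold PySem.Chars.splitOn
  simp

theorem split_first_c (s : List Char) (c : Char) (h : c ∈ s) :
    ∃ r rest, s = r ++ c :: rest ∧ c ∉ r := by
  induction s with
  | nil => simp at h
  | cons d t ih =>
    by_cases hd : d = c
    · exact ⟨[], t, by simp [hd], by simp⟩
    · have hm : c ∈ t := by
        rcases List.mem_cons.mp h with h' | h'
        · exact absurd h'.symm hd
        · exact h'
      obtain ⟨r, rest, heq, hnr⟩ := ih hm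
      refine ⟨d :: r, rest, by simp [heq], ?_⟩
      simp only [List.mem_cons, not_or]
      exact ⟨fun hh => hd hh.symm, hnr⟩

-- first-occurrence reference: the (x, y) of the first row containing '@'
def firstLine (L : List (List Char)) (y : Int) : Option (Int × Int) :=
  match L with
  | [] => none
  | r :: rs => if '@' ∈ r then some (ffirst r '@', y) else firstLine rs (y + 1)

def gridRef (rows : List (List Char)) (y : Int) (robot : Option (Int × Int)) :
    Option (Int × Int) :=
  match rows with
  | [] => robot
  | row :: rs => gridRef rs (y + 1) (if '@' ∈ row then some (ffirst row '@', y) else robot)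

theorem ofList_singleton_eq_at (c : Char) : (String.ofList [c] = "@") ↔ c = '@' := by
  constructor
  · intro h
    have : [c] = ['@'] := String.ofList_inj.mp (by rw [h]; try rfl)
    simpa using this
  · intro h; subst h; rfl

theorem rowScan_map (row : List Char) (x y : Int) (robot : Option (Int × Int)) :
    parseRowScan (row.map (fun c => String.ofList [c])) x y robot =
      if '@' ∈ row then some (x + ffirst row '@', y) else robot := by
  induction row generalizing x with
  | nil => simp [parseRowScan]
  | cons d t ih =>
    simp only [List.map_cons, parseRowScan]
    by_cases hd : d = '@'
    · have : (String.ofList [d] == "@") = true := by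
        simp [beq_iff_eq, ofList_singleton_eq_at, hd]
      rw [this, if_pos rfl]
      simp [hd, ffirst]
    · have : (String.ofList [d] == "@") = false := by
        simp [beq_iff_eq, ofList_singleton_eq_at, hd]
      rw [this]
      simp only [Bool.false_eq_true, if_false, ih]
      by_cases hm : '@' ∈ t
      · have h1 : '@' ∈ d :: t := List.mem_cons_of_mem d hm
        have h2 : ffirst t '@' ≠ -1 := (not_iff_not.mpr (ffirst_eq_neg_one_iff t '@')).mpr (by simpa)
        rw [if_pos hm, if_pos h1]
        simp only [ffirst, if_neg hd, if_neg h2]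
        have harith : x + 1 + ffirst t '@' = x + (1 + ffirst t '@') := by omega
        rw [harith]
      · have h1 : '@' ∉ d :: t := by
          simp only [List.mem_cons, not_or]
          exact ⟨fun hh => hd hh.symm, hm⟩
        rw [if_neg hm, if_neg h1]

theorem gridScan_map (rows : List (List Char)) (y : Int) (robot : Option (Int × Int)) :
    parseGridScan (rows.map (List.map (fun c => String.ofList [c]))) y robot =
      gridRef rows y robot := by
  induction rows generalizing y robot with
  | nil => simp [parseGridScan, gridRef]
  | cons row rs ih =>
    simp only [List.map_cons, parseGridScan, gridRef, ih, rowScan_map]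
    congr 1
    by_cases hm : '@' ∈ row <;> simp [hm]

theorem gridRef_no_at (rows : List (List Char)) (y : Int) (robot : Option (Int × Int))
    (h : ∀ row ∈ rows, '@' ∉ row) : gridRef rows y robot = robot := by
  induction rows generalizing y robot with
  | nil => rfl
  | cons row rs ih =>
    simp only [gridRef]
    rw [if_neg (h row (List.mem_cons_self))]
    exact ih _ _ (fun r hr => h r (List.mem_cons_of_mem _ hr))

-- B's string-offset arithmetic computes the first-occurrence reference
theorem keyB (s : List Char) (y0 : Int) (h : '@' ∈ s) :
    firstLine (PySem.Chars.splitOn s ['\n']) y0 =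
      some (ffirst s '@' - rlast (s.take (ffirst s '@').toNat) '\n' - 1,
            y0 + ((s.take (ffirst s '@').toNat).count '\n' : Int)) := by
  induction hn : s.length using Nat.strong_induction_on generalizing s y0 with
  | _ n ihn =>
  by_cases hnl : '\n' ∈ s
  · obtain ⟨r, rest, rfl, hnr⟩ := split_first_c s '\n' hnl
    rw [splitOn_cons r rest '\n' hnr]
    simp only [firstLine]
    by_cases hmr : '@' ∈ r
    · rw [if_pos hmr]
      have hff : ffirst (r ++ '\n' :: rest) '@' = ffirst r '@' :=
        ffirst_append_left r ('\n' :: rest) '@' hmr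
      have h0 : 0 ≤ ffirst r '@' := ffirst_nonneg r '@' hmr
      have hlt : ffirst r '@' < r.length := ffirst_lt_length r '@'
      have htake : (r ++ '\n' :: rest).take (ffirst (r ++ '\n' :: rest) '@').toNat =
          r.take (ffirst r '@').toNat := by
        rw [hff, List.take_append_of_le_length (by omega)]
      have hnlt : '\n' ∉ r.take (ffirst r '@').toNat :=
        fun hc => hnr (List.mem_of_mem_take hc)
      have hnl2 : rlast (r.take (ffirst r '@').toNat) '\n' = -1 :=
        (rlast_eq_neg_one_iff _ '\n').mpr hnlt
      have hcnt : (r.take (ffirst r '@').toNat).count '\n' = 0 := List.count_eq_zero.mpr hnlt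
      rw [htake, hnl2, hcnt, hff]
      simp
    · have hmrest : '@' ∈ rest := by
        rcases List.mem_append.mp h with h' | h'
        · exact absurd h' hmr
        · rcases List.mem_cons.mp h' with h'' | h''
          · exact absurd h'' (by decide)
          · exact h''
      rw [if_neg hmr]
      have hlen : rest.length < n := by
        subst hn; simp only [List.length_append, List.length_cons]; omega
      rw [ihn rest.length hlen rest (y0 + 1) hmrest rfl]
      have hna : '@' ∉ '\n' :: r.reverse := by simp [hmr]
      have hff : ffirst (r ++ '\n' :: rest) '@' = r.length + 1 + ffirst rest '@' := by
        rw [ffirst_append_right r ('\n' :: rest) '@' hmr (List.mem_cons_of_mem _ hmrest)]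
        simp only [ffirst]
        rw [if_neg (by decide)]
        have h2 : ffirst rest '@' ≠ -1 :=
          (not_iff_not.mpr (ffirst_eq_neg_one_iff rest '@')).mpr (by simpa)
        rw [if_neg h2]
        omega
      have hi0 : 0 ≤ ffirst rest '@' := ffirst_nonneg rest '@' hmrest
      obtain ⟨i, hi⟩ : ∃ i : Nat, ffirst rest '@' = (i : Int) :=
        ⟨_, (Int.toNat_of_nonneg hi0).symm⟩
      have hIN : (ffirst (r ++ '\n' :: rest) '@').toNat = r.length + 1 + i := by
        rw [hff, hi]; omega
      have htake : (r ++ '\n' :: rest).take (r.length + 1 + i) = r ++ '\n' :: rest.take i := by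
        rw [List.take_append, List.take_of_length_le (by omega)]
        congr 1
        have : r.length + 1 + i - r.length = i + 1 := by omega
        rw [this]
        rfl
      have hnlv : rlast ((r ++ '\n' :: rest).take (r.length + 1 + i)) '\n' =
          (r.length : Int) + 1 + rlast (rest.take i) '\n' := by
        rw [htake, rlast_sep_cons]
      have hcnt : ((r ++ '\n' :: rest).take (r.length + 1 + i)).count '\n' =
          1 + (rest.take i).count '\n' := by
        rw [htake, List.count_append, List.count_cons]
        have : r.count '\n' = 0 := List.count_eq_zero.mpr hnr
        simp [this]
        omega
      rw [hIN, hnlv, hcnt, hff, hi]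
      simp only [Int.toNat_natCast, Option.some.injEq, Prod.mk.injEq]
      constructor
      · omega
      · push_cast; ring
  · rw [splitOn_not_mem s '\n' hnl]
    simp only [firstLine]
    rw [if_pos h]
    have h0 : 0 ≤ ffirst s '@' := ffirst_nonneg s '@' h
    have hnlt : '\n' ∉ s.take (ffirst s '@').toNat :=
      fun hc => hnl (List.mem_of_mem_take hc)
    have hnl2 : rlast (s.take (ffirst s '@').toNat) '\n' = -1 :=
      (rlast_eq_neg_one_iff _ '\n').mpr hnlt
    have hcnt : (s.take (ffirst s '@').toNat).count '\n' = 0 := List.count_eq_zero.mpr hnlt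
    rw [hnl2, hcnt]
    simp

theorem gridRef_eq_firstLine (L : List (List Char)) (y : Int)
    (hc : L.countP (fun r => decide ('@' ∈ r)) ≤ 1) :
    gridRef L y none = firstLine L y := by
  induction L generalizing y with
  | nil => rfl
  | cons r rs ih =>
    rw [List.countP_cons] at hc
    simp only [gridRef, firstLine]
    by_cases hm : '@' ∈ r
    · rw [if_pos hm, if_pos hm]
      have hz : rs.countP (fun r => decide ('@' ∈ r)) = 0 := by
        rw [decide_eq_true hm, if_pos rfl] at hc; omega
      have hno : ∀ row ∈ rs, '@' ∉ row := by
        intro row hrow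
        have := List.countP_eq_zero.mp hz row hrow
        simpa using this
      exact gridRef_no_at rs (y + 1) _ hno
    · rw [if_neg hm, if_neg hm]
      exact ih (y + 1) (by rw [decide_eq_false hm, if_neg (by simp)] at hc; omega)

theorem gridRef_snd_ge (L : List (List Char)) (y : Int) (r0 : Option (Int × Int))
    (hm : ∃ r ∈ L, '@' ∈ r) : ∃ x yr, gridRef L y r0 = some (x, yr) ∧ y ≤ yr := by
  induction L generalizing y r0 with
  | nil => simp at hm
  | cons r rs ih =>
    simp only [gridRef]
    by_cases hrs : ∃ row ∈ rs, '@' ∈ row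
    · obtain ⟨x, yr, heq, hle⟩ := ih (y + 1) _ hrs
      exact ⟨x, yr, heq, by omega⟩
    · have hr : '@' ∈ r := by
        obtain ⟨row, hrow, hat⟩ := hm
        rcases List.mem_cons.mp hrow with h' | h'
        · exact h' ▸ hat
        · exact absurd ⟨row, h', hat⟩ hrs
      push_neg at hrs
      rw [if_pos hr, gridRef_no_at rs (y + 1) _ hrs]
      exact ⟨ffirst r '@', y, rfl, le_refl y⟩

theorem gridRef_firstLine_lt (L : List (List Char)) (y : Int)
    (hc : 2 ≤ L.countP (fun r => decide ('@' ∈ r))) :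
    ∃ xA yA xB yB, gridRef L y none = some (xA, yA) ∧ firstLine L y = some (xB, yB) ∧
      yB < yA := by
  induction L generalizing y with
  | nil => rw [List.countP_nil] at hc; omega
  | cons r rs ih =>
    rw [List.countP_cons] at hc
    simp only [gridRef, firstLine]
    by_cases hm : '@' ∈ r
    · rw [if_pos hm, if_pos hm]
      have h1 : 1 ≤ rs.countP (fun r => decide ('@' ∈ r)) := by
        rw [decide_eq_true hm, if_pos rfl] at hc; omega
      have hpos : 0 < rs.countP (fun r => decide ('@' ∈ r)) := by omega
      have hex : ∃ row ∈ rs, '@' ∈ row := by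
        obtain ⟨row, hrow, hp⟩ := List.countP_pos_iff.mp hpos
        exact ⟨row, hrow, by simpa using hp⟩
      obtain ⟨x, yr, heq, hle⟩ := gridRef_snd_ge rs (y + 1) _ hex
      exact ⟨x, yr, ffirst r '@', y, heq, rfl, by omega⟩
    · rw [if_neg hm, if_neg hm]
      exact ih (y + 1) (by rw [decide_eq_false hm, if_neg (by simp)] at hc; omega)

-- bridges from the String-level ports to the char-level references
theorem rows_eq (ml : String) :
    ((PySem.Str.split? ml "\n").getD []).map String.toList =
      PySem.Chars.splitOn ml.toList ['\n'] := by
  have htn : ("\n" : String).toList = ['\n'] := by decide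
  have h := PySem.Str.split?_map ml "\n"
  rw [htn, PySem.Chars.split?.eq_1, if_neg (by decide)] at h
  cases hsp : PySem.Str.split? ml "\n" with
  | none => rw [hsp] at h; simp at h
  | some L => rw [hsp] at h; simpa using h

theorem gridA_eq (ml : String) :
    parseGridScan (((PySem.Str.split? ml "\n").getD []).map
        (fun line => line.toList.map (fun c => String.ofList [c]))) 0 none =
      gridRef (PySem.Chars.splitOn ml.toList ['\n']) 0 none := by
  have hmm : List.map (fun line => List.map (fun c => String.ofList [c]) line.toList)
      ((PySem.Str.split? ml "\n").getD []) =
      List.map (List.map (fun c => String.ofList [c]))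
        (List.map String.toList ((PySem.Str.split? ml "\n").getD [])) := by
    rw [List.map_map]; rfl
  rw [hmm, rows_eq]
  exact gridScan_map _ 0 none

theorem mem_of_isIn_at (ml : String) (hat : PySem.Str.isIn "@" ml = true) :
    '@' ∈ ml.toList := by
  have htl : ("@" : String).toList = ['@'] := by decide
  rw [PySem.Str.isIn_eq, htl] at hat
  unfold PySem.Chars.isIn at hat
  rw [find_single] at hat
  have : ffirst ml.toList '@' ≠ -1 := by simpa using hat
  by_contra hc
  exact this ((ffirst_eq_neg_one_iff _ '@').mpr hc)

-- D_parse's char-level matrix block is the .toList of the block the ports cut off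
theorem blockD_eq (input : String) :
    ((PySem.Chars.split? input.toList ['\n', '\n']).getD []).getD 0 [] =
      (((PySem.Str.split? input "\n\n").getD []).getD 0 "").toList := by
  have htn : ("\n\n" : String).toList = ['\n', '\n'] := by decide
  have h := PySem.Str.split?_map input "\n\n"
  rw [htn] at h
  rw [PySem.Chars.split?.eq_1, if_neg (by decide)]
  cases hsp : PySem.Str.split? input "\n\n" with
  | none =>
    rw [hsp] at h
    rw [PySem.Chars.split?.eq_1, if_neg (by decide)] at h
    simp at h
  | some L =>
    rw [hsp] at h
    rw [PySem.Chars.split?.eq_1, if_neg (by decide)] at h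
    have hL : L.map String.toList = PySem.Chars.splitOn input.toList ['\n', '\n'] := by
      simpa using h
    rw [← hL]
    cases L with
    | nil => simp
    | cons a t => simp

-- B's robot expression as firstLine
theorem robotB_eq (ml : String) (hat : PySem.Str.isIn "@" ml = true) :
    (if PySem.Str.find ml "@" == -1 then (none : Option (Int × Int))
     else
       some (PySem.Str.find ml "@" -
               PySem.Str.rfind (PySem.Str.slice ml none (some (PySem.Str.find ml "@"))) "\n" - 1,
             (PySem.Str.count (PySem.Str.slice ml none (some (PySem.Str.find ml "@"))) "\n" : Int))) =
      firstLine (PySem.Chars.splitOn ml.toList ['\n']) 0 := by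
  have htl : ("@" : String).toList = ['@'] := by decide
  have htn : ("\n" : String).toList = ['\n'] := by decide
  have hmem : '@' ∈ ml.toList := mem_of_isIn_at ml hat
  have hfd : PySem.Str.find ml "@" = ffirst ml.toList '@' := by
    rw [PySem.Str.find_eq, htl, find_single]
  have h0 : 0 ≤ ffirst ml.toList '@' := ffirst_nonneg _ '@' hmem
  have hbeq : (PySem.Str.find ml "@" == -1) = false := by
    rw [hfd]; simp only [beq_eq_false_iff_ne, ne_eq]; omega
  have hhead : (PySem.Str.slice ml none (some (PySem.Str.find ml "@"))).toList =
      ml.toList.take (ffirst ml.toList '@').toNat := by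
    rw [PySem.Str.toList_slice, PySem.Chars.slice_eq_listSlice, hfd]
    rw [show ffirst ml.toList '@' = (((ffirst ml.toList '@').toNat : Nat) : Int) by omega]
    exact PySem.List.slice_to_natCast _ _
  have hnlv : PySem.Str.rfind (PySem.Str.slice ml none (some (PySem.Str.find ml "@"))) "\n" =
      rlast (ml.toList.take (ffirst ml.toList '@').toNat) '\n' := by
    rw [PySem.Str.rfind_eq, htn, rfind_single, hhead]
  have hcntv : PySem.Str.count (PySem.Str.slice ml none (some (PySem.Str.find ml "@"))) "\n" =
      (ml.toList.take (ffirst ml.toList '@').toNat).count '\n' := by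
    rw [PySem.Str.count_eq, htn, count_single, hhead]
  rw [keyB ml.toList 0 hmem, hbeq]
  simp only [Bool.false_eq_true, if_false]
  rw [hnlv, hcntv, hfd, zero_add]

-- ===== VERDICT (by name: the statement is the Claim_ definition above) =====
set_option maxHeartbeats 1000000 in
theorem parse_spec : Claim_unchanged_parse := by
  intro input verbose _ hpre hnd
  obtain ⟨-, hat⟩ := hpre
  unfold D_parse at hnd
  show parse input verbose = parse_alt input verbose
  unfold parse parse_alt
  simp only [Prod.mk.injEq]
  refine ⟨trivial, ?_, trivial⟩
  set ml := ((PySem.Str.split? input "\n\n").getD []).getD 0 "" with hml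
  have hc1 : (PySem.Chars.splitOn ml.toList ['\n']).countP (fun r => decide ('@' ∈ r)) ≤ 1 := by
    rw [hml, ← blockD_eq]; omega
  congr 1
  rw [gridA_eq, gridRef_eq_firstLine _ 0 hc1]
  exact (robotB_eq ml hat).symm

set_option maxHeartbeats 4000000 in
theorem parse_changed : Claim_changed_parse := by
  unfold Claim_changed_parse; decide

set_option maxHeartbeats 1000000 in
theorem parse_tight : Claim_exact_parse := by
  intro input verbose _ hpre hd heq
  obtain ⟨-, hat⟩ := hpre
  unfold D_parse at hd
  set ml := ((PySem.Str.split? input "\n\n").getD []).getD 0 "" with hml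
  have hc2 : 2 ≤ (PySem.Chars.splitOn ml.toList ['\n']).countP (fun r => decide ('@' ∈ r)) := by
    rw [hml, ← blockD_eq]; omega
  obtain ⟨xA, yA, xB, yB, hA, hB, hlt⟩ := gridRef_firstLine_lt _ 0 hc2
  have hr := congrArg (fun t => t.2.1) heq
  unfold parse parse_alt at hr
  simp only at hr
  rw [gridA_eq, hA] at hr
  rw [robotB_eq ml hat, hB] at hr
  simp only [Option.getD_some] at hr
  have : yA = yB := congrArg Prod.snd hr
  omega
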